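-- pv_equiv track=rewrite | github.com/rd2leu/d2tools | utilities.py | extract_account_ids2
-- ===== SOURCE A (Python) =====
-- def extract_account_id(profile_url, index = 0, kwd = 'players/'):
--     try:
--         splt = profile_url[index:].split(kwd)
--         a = splt[1]
--         for i, c in enumerate(a):
--             if not c.isdigit():
--                 a = a[:i]
--                 break
--         return a, index + len(kwd) + len(splt[0]) + i + 1 # FIXME needs testing
--     except:
--         raise SyntaxError('Invalid account url: ' + profile_url)
--
-- def extract_account_ids2(profile_url):
--     # euh idk why
--     acc, idx = '', 0
--     for k in ['players/', 'player/']: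
--         try:
--             acc, idx = extract_account_id(profile_url, kwd = k)
--             break
--         except:
--             pass
--     if acc == '':
--         return []
--     return [acc] + extract_account_ids2(profile_url[idx:])
-- ===== SOURCE B (Python) =====
-- def _next_id(url, kwd):
--     """First id after kwd in url: the digit prefix of the text between this
--     occurrence of kwd and the next one (or the end of url), paired with the
--     offset at which scanning should resume (just past that text's first
--     non-digit, or at its end). None when kwd does not occur, or nothing at
--     all stands between it and the next occurrence / the end of url."""
--     head, sep, tail = url.partition(kwd)
--     if not sep:
--         return None
--     segment = tail.partition(kwd)[0]
--     if not segment: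
--         return None
--     base = len(head) + len(kwd)
--     for i, ch in enumerate(segment):
--         if not ch.isdigit():
--             return segment[:i], base + i + 1
--     return segment, base + len(segment)
--
-- def extract_account_ids2(profile_url):
--     ids = []
--     url = profile_url
--     while True:
--         hit = _next_id(url, 'players/')
--         if hit is None:
--             hit = _next_id(url, 'player/')
--         if hit is None or hit[0] == '':
--             return ids
--         ids.append(hit[0])
--         url = url[hit[1]:]
-- ===== Notes on version B (the rewrite author's own statement) =====
-- stated objective: alternative
-- what changed: Replaces the exception-driven tail recursion (recursing on the sliced suffix and concatenating [acc] + recursive result) with an iterative accumulator loop over a partition-based helper that returns Optional instead of raising, locating the id between keyword occurrences with str.partition instead of str.split.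
import Mathlib
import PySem

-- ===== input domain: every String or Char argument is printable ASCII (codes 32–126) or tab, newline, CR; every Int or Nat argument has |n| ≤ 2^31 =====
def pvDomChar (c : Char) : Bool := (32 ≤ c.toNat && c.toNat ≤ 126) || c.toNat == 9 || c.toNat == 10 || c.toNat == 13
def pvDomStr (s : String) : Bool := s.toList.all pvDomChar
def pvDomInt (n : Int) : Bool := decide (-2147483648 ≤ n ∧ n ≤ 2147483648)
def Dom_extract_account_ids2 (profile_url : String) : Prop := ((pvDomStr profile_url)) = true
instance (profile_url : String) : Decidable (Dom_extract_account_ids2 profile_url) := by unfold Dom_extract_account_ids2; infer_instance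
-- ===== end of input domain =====

-- B replaces A's exception-driven tail recursion over str.split by an iterative
-- accumulator loop over a partition-based helper (alternative decomposition, same cost).


-- ===== PORT A =====

-- the 'for i, c in enumerate(a)' loop of extract_account_id: returns the final i
-- and whether the loop broke; none = the loop never ran, so i is unbound (NameError)
def pvA_loop : List Char → Nat → Option (Nat × Bool)
  | [], 0 => none
  | [], p + 1 => some (p, false)
  | c :: rest, p =>
    if PySem.Chars.isdigit c = false then some (p, true) else pvA_loop rest (p + 1)

-- port of extract_account_id's try block; none = the raised SyntaxError
def pvA_extract_account_id (profile_url : List Char) (index : Int) (kwd : List Char) :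
    Option (List Char × Int) :=
  match PySem.Chars.split? (PySem.Chars.slice profile_url (some index) none) kwd with
  | none => none
  | some splt =>
    match PySem.List.pyGet? splt 0, PySem.List.pyGet? splt 1 with
    | some s0, some a =>
      match pvA_loop a 0 with
      | none => none
      | some (i, broke) =>
        some (if broke then PySem.Chars.slice a none (some (i : Int)) else a,
              index + (kwd.length : Int) + (s0.length : Int) + (i : Int) + 1)
    | _, _ => none

-- termination facts for the recursions (cited by decreasing_by)
theorem pvA_id_nil (kwd : List Char) : pvA_extract_account_id [] 0 kwd = none := by
  unfold pvA_extract_account_id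
  cases hsp : PySem.Chars.split? (PySem.Chars.slice [] (some 0) none) kwd with
  | none => rfl
  | some splt =>
    have hs : splt = [[]] := by
      rw [show PySem.Chars.slice [] (some 0) none = [] from rfl] at hsp
      unfold PySem.Chars.split? at hsp
      split at hsp
      · cases hsp
      · rw [show PySem.Chars.splitOn [] kwd = [[]] from rfl] at hsp
        exact (Option.some.injEq _ _ ▸ hsp).symm
    subst hs
    rfl

theorem pvA_id_bound (s : List Char) (kwd : List Char) (acc : List Char) (idx : Int)
    (h : pvA_extract_account_id s 0 kwd = some (acc, idx)) : 1 ≤ idx ∧ s ≠ [] := by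
  refine ⟨?_, ?_⟩
  · unfold pvA_extract_account_id at h
    split at h
    · exact absurd h (by simp)
    · split at h
      · split at h
        · exact absurd h (by simp)
        · simp only [Option.some.injEq, Prod.mk.injEq] at h
          rcases h with ⟨-, h2⟩
          omega
      · exact absurd h (by simp)
  · rintro rfl
    rw [pvA_id_nil] at h
    exact absurd h (by simp)

theorem pv_slice_len_lt (l : List Char) (idx : Int) (h1 : 1 ≤ idx) (h2 : l ≠ []) :
    (PySem.Chars.slice l (some idx) none).length < l.length := by
  have hc : idx = ((idx.toNat : Nat) : Int) := by omega
  rw [PySem.Chars.slice_eq_listSlice, PySem.List.slice_some_none, hc, PySem.List.clampIdx_natCast]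
  have : l.length ≠ 0 := by simpa using (List.length_pos_of_ne_nil h2).ne'
  simp [List.length_drop]; omega

def pvA_ids (s : List Char) : List (List Char) :=
  -- acc, idx = '', 0; for k in [...]: try: acc, idx = extract_account_id(...); break
  match h : (match pvA_extract_account_id s 0 "players/".toList with
             | some v => some v
             | none => pvA_extract_account_id s 0 "player/".toList) with
  | none => []                      -- acc stayed '': return []
  | some (acc, idx) =>
    if acc = [] then []             -- if acc == '': return []
    else acc :: pvA_ids (PySem.Chars.slice s (some idx) none)
termination_by s.length
decreasing_by
  have hb : 1 ≤ idx ∧ s ≠ [] := by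
    cases hp : pvA_extract_account_id s 0 "players/".toList with
    | some v =>
      rw [hp] at h; simp only [Option.some.injEq] at h; rw [h] at hp
      exact pvA_id_bound s "players/".toList acc idx hp
    | none =>
      rw [hp] at h
      exact pvA_id_bound s "player/".toList acc idx h
  exact pv_slice_len_lt s idx hb.1 hb.2

def extract_account_ids2 (profile_url : String) : List String :=
  (pvA_ids profile_url.toList).map String.ofList

-- ===== PORT B =====

-- url.partition(kwd) = (head, sep-found?, tail); exact for nonempty kwd
def pvB_partition (url kwd : List Char) : List Char × Bool × List Char :=
  let f := PySem.Chars.find url kwd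
  if f < 0 then (url, false, [])
  else (url.take f.toNat, true, url.drop (f.toNat + kwd.length))

-- the 'for i, ch in enumerate(segment)' loop of _next_id with its two returns
def pvB_idLoop (seg : List Char) (i : Nat) (base : Nat) (orig : List Char) :
    List Char × Int :=
  match seg with
  | [] => (orig, ((base + orig.length : Nat) : Int))
  | c :: rest =>
    if PySem.Chars.isdigit c = false then (orig.take i, ((base + i + 1 : Nat) : Int))
    else pvB_idLoop rest (i + 1) base orig

-- port of _next_id
def pvB_next (url kwd : List Char) : Option (List Char × Int) :=
  match pvB_partition url kwd with
  | (_, false, _) => none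
  | (head, true, tail) =>
    let segment := (pvB_partition tail kwd).1
    if segment = [] then none
    else some (pvB_idLoop segment 0 (head.length + kwd.length) segment)

-- termination facts for pvB_go's recursion (cited by decreasing_by)
theorem pvB_idLoop_pos (seg : List Char) (i : Nat) (base : Nat) (orig : List Char)
    (h : 1 ≤ base) : 1 ≤ (pvB_idLoop seg i base orig).2 := by
  induction seg generalizing i with
  | nil => simp only [pvB_idLoop]; omega
  | cons c rest ih =>
    simp only [pvB_idLoop]
    split
    · simp only; omega
    · exact ih (i + 1)

theorem pvB_next_bound (url : List Char) (kwd : List Char) (acc : List Char) (idx : Int)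
    (hk : kwd ≠ []) (h : pvB_next url kwd = some (acc, idx)) : 1 ≤ idx ∧ url ≠ [] := by
  have hkl : 1 ≤ kwd.length := List.length_pos_iff.mpr hk
  unfold pvB_next at h
  split at h
  next => exact absurd h (by simp)
  next head tail heq =>
    have hfound : ¬ PySem.Chars.find url kwd < 0 := by
      intro hlt
      unfold pvB_partition at heq
      rw [if_pos hlt] at heq
      exact Bool.false_ne_true (congrArg (fun p => p.2.1) heq)
    have hinf := (PySem.Chars.find_nonneg_iff url kwd).mp (by omega)
    refine ⟨?_, fun hnil => hk (List.eq_nil_of_infix_nil (hnil ▸ hinf))⟩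
    dsimp only at h
    split at h
    · exact absurd h (by simp)
    · have hidx : idx = (pvB_idLoop ((pvB_partition tail kwd).1) 0
          (head.length + kwd.length) ((pvB_partition tail kwd).1)).2 := by
        have := congrArg (fun o => o.map Prod.snd) h
        simp at this
        omega
      rw [hidx]
      exact pvB_idLoop_pos _ _ _ _ (by omega)

def pvB_go (url : List Char) (ids : List (List Char)) : List (List Char) :=
  match h : (match pvB_next url "players/".toList with
             | some r => some r
             | none => pvB_next url "player/".toList) with
  | none => ids
  | some (acc, idx) =>
    if acc = [] then ids
    else pvB_go (PySem.Chars.slice url (some idx) none) (ids ++ [acc])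
termination_by url.length
decreasing_by
  have hb : 1 ≤ idx ∧ url ≠ [] := by
    cases hp : pvB_next url "players/".toList with
    | some v =>
      rw [hp] at h; simp only [Option.some.injEq] at h; rw [h] at hp
      exact pvB_next_bound url "players/".toList acc idx (by decide) hp
    | none =>
      rw [hp] at h
      exact pvB_next_bound url "player/".toList acc idx (by decide) h
  exact pv_slice_len_lt url idx hb.1 hb.2

def extract_account_ids2_alt (profile_url : String) : List String :=
  (pvB_go profile_url.toList []).map String.ofList

-- ===== PRECONDITION & SPEC =====
def Spec_extract_account_ids2 (profile_url : String) (out : List String) : Prop := out = extract_account_ids2_alt profile_url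
instance (profile_url : String) (out : List String) : Decidable (Spec_extract_account_ids2 profile_url out) := by unfold Spec_extract_account_ids2; infer_instance

-- ===== CLAIM (what is proved, stated in full; the proofs are below) =====
def Claim_equal_extract_account_ids2 : Prop := ∀ (profile_url : String), Dom_extract_account_ids2 profile_url → Spec_extract_account_ids2 profile_url (extract_account_ids2 profile_url)

-- ===== LEMMAS AND PROOFS =====

-- head-modifier used to characterise splitOn.go's accumulated current piece
def pvModHead (p : List Char) : List (List Char) → List (List Char)
  | [] => []
  | h :: t => (p ++ h) :: t

theorem pvModHead_nil (l : List (List Char)) : pvModHead [] l = l := by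
  cases l <;> simp [pvModHead]

theorem pvModHead_comp (p q : List Char) (l : List (List Char)) :
    pvModHead p (pvModHead q l) = pvModHead (p ++ q) l := by
  cases l <;> simp [pvModHead]

-- find is characterised by its spec (uniqueness of the first occurrence)
theorem pv_find_eq (l kwd : List Char) (k : Nat) (h1 : kwd <+: l.drop k)
    (h2 : ∀ i < k, ¬ kwd <+: l.drop i) : PySem.Chars.find l kwd = (k : Int) := by
  have hinf : kwd <:+: l := h1.isInfix.trans (List.drop_suffix k l).isInfix
  have h0 : 0 ≤ PySem.Chars.find l kwd := (PySem.Chars.find_nonneg_iff _ _).mpr hinf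
  obtain ⟨hp, hmin⟩ := PySem.Chars.find_spec h0
  rcases lt_trichotomy (PySem.Chars.find l kwd).toNat k with h | h | h
  · exact absurd hp (h2 _ h)
  · omega
  · exact absurd h1 (hmin _ h)

theorem pv_find_cons (c : Char) (rest kwd : List Char) (hnp : ¬ kwd <+: (c :: rest)) :
    PySem.Chars.find (c :: rest) kwd =
      if PySem.Chars.find rest kwd < 0 then -1 else PySem.Chars.find rest kwd + 1 := by
  split
  next hneg =>
    have : PySem.Chars.find rest kwd = -1 := by
      have := PySem.Chars.neg_one_le_find rest kwd; omega
    have hni : ¬ kwd <:+: rest := (PySem.Chars.find_eq_neg_one_iff _ _).mp this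
    rw [PySem.Chars.find_eq_neg_one_iff]
    intro hin
    obtain ⟨j, hj⟩ := (PySem.Chars.exists_prefix_drop_iff_isIn kwd (c :: rest)).mpr
      ((PySem.Chars.isIn_iff_infix _ _).mpr hin)
    cases j with
    | zero => exact hnp (by simpa using hj)
    | succ j =>
      have hj' : kwd <+: rest.drop j := by simpa using hj
      exact hni (hj'.isInfix.trans (List.drop_suffix j rest).isInfix)
  next hpos =>
    have h0 : 0 ≤ PySem.Chars.find rest kwd := by omega
    obtain ⟨hp, hmin⟩ := PySem.Chars.find_spec h0
    have := pv_find_eq (c :: rest) kwd ((PySem.Chars.find rest kwd).toNat + 1) ?_ ?_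
    · rw [this]; push_cast; omega
    · simpa using hp
    · intro i hi
      cases i with
      | zero => simpa using hnp
      | succ i => intro hpre; exact hmin i (by omega) (by simpa using hpre)

def pvSegs (kwd : List Char) (s : List Char) : List (List Char) :=
  if hk : kwd = [] then [s]
  else
    let f := PySem.Chars.find s kwd
    if _hf : f < 0 then [s]
    else s.take f.toNat :: pvSegs kwd (s.drop (f.toNat + kwd.length))
termination_by s.length
decreasing_by
  have h0 : 0 ≤ PySem.Chars.find s kwd := by omega
  have hinf : kwd <:+: s := (PySem.Chars.find_nonneg_iff _ _).mp h0
  have hs : s ≠ [] := fun hn => hk (List.eq_nil_of_infix_nil (hn ▸ hinf))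
  have : 1 ≤ kwd.length := List.length_pos_iff.mpr hk
  have : s.length ≠ 0 := by simpa using (List.length_pos_of_ne_nil hs).ne'
  simp [List.length_drop]; omega

theorem pvSegs_cons (c : Char) (rest kwd : List Char) (hk : kwd ≠ [])
    (hnp : ¬ kwd <+: (c :: rest)) :
    pvSegs kwd (c :: rest) = pvModHead [c] (pvSegs kwd rest) := by
  rw [pvSegs, pvSegs]
  rw [dif_neg hk, dif_neg hk]
  rw [pv_find_cons c rest kwd hnp]
  by_cases hneg : PySem.Chars.find rest kwd < 0
  · rw [if_pos hneg, dif_pos (by norm_num), dif_pos hneg]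
    simp [pvModHead]
  · rw [if_neg hneg, dif_neg (by omega), dif_neg hneg]
    have h0 : 0 ≤ PySem.Chars.find rest kwd := by omega
    simp only [pvModHead]
    congr 1
    · rw [show (PySem.Chars.find rest kwd + 1).toNat
          = (PySem.Chars.find rest kwd).toNat + 1 by omega]
      simp [List.take_succ_cons]
    · rw [show (PySem.Chars.find rest kwd + 1).toNat + kwd.length
          = (PySem.Chars.find rest kwd).toNat + kwd.length + 1 by omega]
      rw [List.drop_succ_cons]

theorem pv_find_nil (kwd : List Char) (hk : kwd ≠ []) : PySem.Chars.find [] kwd = -1 := by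
  rw [PySem.Chars.find_eq_neg_one_iff]
  intro h
  exact hk (List.eq_nil_of_infix_nil h)

theorem pvSegs_nil (kwd : List Char) (hk : kwd ≠ []) : pvSegs kwd [] = [[]] := by
  rw [pvSegs, dif_neg hk, dif_pos (by rw [pv_find_nil kwd hk]; norm_num)]

theorem pv_go_spec (kwd : List Char) (hk : kwd ≠ []) :
    ∀ (fuel : Nat) (l cur : List Char) (acc : List (List Char)), l.length < fuel →
      PySem.Chars.splitOn.go kwd fuel l cur acc =
        acc.reverse ++ pvModHead cur.reverse (pvSegs kwd l) := by
  intro fuel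
  induction fuel with
  | zero => intro l cur acc h; omega
  | succ n ih =>
    intro l cur acc h
    cases l with
    | nil =>
      rw [PySem.Chars.splitOn.go.eq_def]
      simp [pvSegs_nil kwd hk, pvModHead]
    | cons c rest =>
      rw [PySem.Chars.splitOn.go.eq_def]
      simp only []
      by_cases hp : kwd.isPrefixOf (c :: rest)
      · rw [if_pos hp]
        rw [ih ((c :: rest).drop kwd.length) [] (cur.reverse :: acc)
            (by have : 1 ≤ kwd.length := List.length_pos_iff.mpr hk
                simp only [List.length_drop]; simp at h ⊢; omega)]
        have hf0 : PySem.Chars.find (c :: rest) kwd = (0 : Int) := by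
          exact pv_find_eq _ _ 0 (by simpa using List.isPrefixOf_iff_prefix.mp hp)
            (by omega)
        have hseg : pvSegs kwd (c :: rest) = [] :: pvSegs kwd ((c :: rest).drop kwd.length) := by
          conv_lhs => rw [pvSegs]
          rw [dif_neg hk, dif_neg (by rw [hf0]; norm_num)]
          simp [hf0]
        rw [hseg]
        cases hx : pvSegs kwd ((c :: rest).drop kwd.length) <;> simp [pvModHead]
      · rw [if_neg hp]
        rw [ih rest (c :: cur) acc (by simp at h ⊢; omega)]
        rw [pvSegs_cons c rest kwd hk (fun hpre => hp (List.isPrefixOf_iff_prefix.mpr hpre))]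
        simp [pvModHead_comp]

theorem pv_splitOn_eq (s kwd : List Char) (hk : kwd ≠ []) :
    PySem.Chars.splitOn s kwd = pvSegs kwd s := by
  unfold PySem.Chars.splitOn
  rw [pv_go_spec kwd hk (s.length + 1) s [] [] (by omega)]
  simp [pvModHead_nil]

-- the leading digit run, used to characterise both versions' inner loops
def pvB_run : List Char → Nat
  | [] => 0
  | c :: rest => if PySem.Chars.isdigit c then pvB_run rest + 1 else 0

theorem pvB_run_le (l : List Char) : pvB_run l ≤ l.length := by
  induction l with
  | nil => simp [pvB_run]
  | cons c rest ih => simp only [pvB_run]; split <;> simp <;> omega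

theorem pvA_loop_of_lt (l : List Char) (p : Nat) (h : pvB_run l < l.length) :
    pvA_loop l p = some (p + pvB_run l, true) := by
  induction l generalizing p with
  | nil => simp at h
  | cons c rest ih =>
    simp only [pvA_loop, pvB_run]
    by_cases hd : PySem.Chars.isdigit c
    · rw [if_neg (by simp [hd])]
      have hlt : pvB_run rest < rest.length := by
        simp only [pvB_run, hd, if_true] at h; simpa using Nat.lt_of_succ_lt_succ h
      rw [ih (p + 1) hlt, if_pos hd]
      simp only [Option.some.injEq, Prod.mk.injEq]
      exact ⟨by omega, trivial⟩
    · rw [if_pos (by simp [hd]), if_neg hd]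
      simp

theorem pvA_loop_of_eq (l : List Char) (p : Nat) (hne : l ≠ [])
    (h : pvB_run l = l.length) : pvA_loop l p = some (p + l.length - 1, false) := by
  induction l generalizing p with
  | nil => exact absurd rfl hne
  | cons c rest ih =>
    have hd : PySem.Chars.isdigit c = true := by
      by_contra hc
      simp only [pvB_run, Bool.not_eq_true] at h hc
      rw [if_neg (by simp [hc])] at h
      simp at h
    simp only [pvA_loop, pvB_run, hd, if_true] at h ⊢
    rw [if_neg (by simp)]
    cases hrest : rest with
    | nil => subst hrest; simp [pvA_loop]
    | cons d t =>
      rw [← hrest]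
      have hr : pvB_run rest = rest.length := by simpa using h
      rw [ih (p + 1) (by simp [hrest]) hr]
      simp only [Option.some.injEq, Prod.mk.injEq]
      have : 1 ≤ rest.length := by simp [hrest]
      exact ⟨by omega, trivial⟩

theorem pvB_idLoop_of_lt (seg : List Char) (j base : Nat) (orig : List Char)
    (h : pvB_run seg < seg.length) :
    pvB_idLoop seg j base orig
      = (orig.take (j + pvB_run seg), ((base + (j + pvB_run seg) + 1 : Nat) : Int)) := by
  induction seg generalizing j with
  | nil => simp at h
  | cons c rest ih =>
    simp only [pvB_idLoop, pvB_run]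
    by_cases hd : PySem.Chars.isdigit c
    · rw [if_neg (by simp [hd])]
      have hlt : pvB_run rest < rest.length := by
        simp only [pvB_run, hd, if_true] at h; simpa using Nat.lt_of_succ_lt_succ h
      rw [ih (j + 1) hlt, if_pos hd]
      simp only [Prod.mk.injEq]
      constructor
      · congr 1; omega
      · congr 1; omega
    · rw [if_pos (by simp [hd]), if_neg hd]
      simp

theorem pvB_idLoop_of_eq (seg : List Char) (j base : Nat) (orig : List Char)
    (h : pvB_run seg = seg.length) :
    pvB_idLoop seg j base orig = (orig, ((base + orig.length : Nat) : Int)) := by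
  induction seg generalizing j with
  | nil => simp [pvB_idLoop]
  | cons c rest ih =>
    have hd : PySem.Chars.isdigit c = true := by
      by_contra hc
      simp only [pvB_run, Bool.not_eq_true] at h hc
      rw [if_neg (by simp [hc])] at h
      simp at h
    simp only [pvB_run, hd, if_true] at h
    simp only [pvB_idLoop]
    rw [if_neg (by simp [hd])]
    exact ih (j + 1) (by simpa using h)

theorem pv_helper_eq (s kwd : List Char) (hk : kwd ≠ []) :
    pvA_extract_account_id s 0 kwd = pvB_next s kwd := by
  have hkl : 1 ≤ kwd.length := List.length_pos_iff.mpr hk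
  have hsl : PySem.Chars.slice s (some 0) none = s := by
    simp [PySem.Chars.slice_eq_listSlice]
  have hsp : PySem.Chars.split? s kwd = some (pvSegs kwd s) := by
    unfold PySem.Chars.split?
    rw [if_neg (by simpa using hk), pv_splitOn_eq s kwd hk]
  by_cases hpos : PySem.Chars.find s kwd < 0
  · -- keyword absent: both none
    have hsegs : pvSegs kwd s = [s] := by
      rw [pvSegs, dif_neg hk, dif_pos hpos]
    have hA : pvA_extract_account_id s 0 kwd = none := by
      unfold pvA_extract_account_id
      rw [hsl, hsp, hsegs]
      dsimp only
      have h1 : PySem.List.pyGet? [s] (1:Int) = none := by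
        rw [show (1:Int) = ((1:Nat):Int) by norm_num, PySem.List.pyGet?_natCast]; rfl
      rw [h1]
      cases hx : PySem.List.pyGet? [s] (0:Int) <;> rfl
    have hB : pvB_next s kwd = none := by
      unfold pvB_next pvB_partition
      rw [if_pos hpos]
    rw [hA, hB]
  · -- keyword found
    have hp0 : 0 ≤ PySem.Chars.find s kwd := by omega
    obtain ⟨hoccp, hminp⟩ := PySem.Chars.find_spec hp0
    have hPle : (PySem.Chars.find s kwd).toNat + kwd.length ≤ s.length := by
      have h1 := hoccp.length_le
      have h2 := PySem.Chars.find_le_length s kwd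
      simp [List.length_drop] at h1
      omega
    generalize hP : (PySem.Chars.find s kwd).toNat = P at *
    generalize hrest : s.drop (P + kwd.length) = rest at *
    generalize hf2 : PySem.Chars.find rest kwd = f2 at *
    have hf2ge : -1 ≤ f2 := hf2 ▸ PySem.Chars.neg_one_le_find rest kwd
    -- the common segment between the two occurrences
    generalize hseg : (if f2 < 0 then rest else rest.take f2.toNat) = seg at *
    -- the second piece of A's split is the segment
    obtain ⟨tl, htl⟩ : ∃ tl, pvSegs kwd rest = seg :: tl := by
      rw [pvSegs, dif_neg hk, hf2]
      rcases lt_or_ge f2 0 with h2 | h2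
      · rw [dif_pos h2, ← hseg, if_pos h2]
        exact ⟨[], rfl⟩
      · rw [dif_neg (by omega), ← hseg, if_neg (by omega)]
        exact ⟨_, rfl⟩
    have hsegs : pvSegs kwd s = s.take P :: seg :: tl := by
      rw [pvSegs, dif_neg hk, dif_neg hpos, hP, hrest, htl]
    have hlenP : (s.take P).length = P := by
      simp [List.length_take]; omega
    -- A's helper, reduced
    have hA : pvA_extract_account_id s 0 kwd =
        match pvA_loop seg 0 with
        | none => none
        | some (i, broke) =>
          some (if broke then PySem.Chars.slice seg none (some (i : Int)) else seg,
                0 + (kwd.length : Int) + (P : Int) + (i : Int) + 1) := by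
      unfold pvA_extract_account_id
      rw [hsl, hsp, hsegs]
      dsimp only
      rw [show PySem.List.pyGet? (s.take P :: seg :: tl) (0:Int) = some (s.take P) by
          rw [show (0:Int) = ((0:Nat):Int) by norm_num, PySem.List.pyGet?_natCast]; rfl]
      rw [show PySem.List.pyGet? (s.take P :: seg :: tl) (1:Int) = some seg by
          rw [show (1:Int) = ((1:Nat):Int) by norm_num, PySem.List.pyGet?_natCast]; rfl]
      dsimp only
      rw [hlenP]
    -- B's helper, reduced
    have hB : pvB_next s kwd =
        if seg = [] then none
        else some (pvB_idLoop seg 0 (P + kwd.length) seg) := by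
      have hp1 : pvB_partition s kwd = (s.take P, true, rest) := by
        unfold pvB_partition
        rw [if_neg hpos, hP, hrest]
      have hp2 : (pvB_partition rest kwd).1 = seg := by
        unfold pvB_partition
        rw [hf2]
        rcases lt_or_ge f2 0 with h2 | h2
        · rw [if_pos h2, ← hseg, if_pos h2]
        · rw [if_neg (by omega), ← hseg, if_neg (by omega)]
      unfold pvB_next
      rw [hp1]
      dsimp only
      rw [hp2, hlenP]
    rw [hA, hB]
    rcases eq_or_ne seg [] with h0 | h0
    · subst h0
      simp [pvA_loop]
    · rw [if_neg h0]
      rcases lt_or_eq_of_le (pvB_run_le seg) with hlt | heq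
      · -- the loop breaks at the first non-digit
        rw [pvA_loop_of_lt seg 0 hlt, pvB_idLoop_of_lt seg 0 (P + kwd.length) seg hlt]
        dsimp only
        have hsl2 : PySem.Chars.slice seg none (some ((pvB_run seg : Nat) : Int))
            = seg.take (pvB_run seg) := by
          rw [PySem.Chars.slice_eq_listSlice, PySem.List.slice_to_natCast]
        simp only [if_true, Nat.zero_add, hsl2]
        simp only [Option.some.injEq, Prod.mk.injEq]
        refine ⟨trivial, ?_⟩
        push_cast
        ring
      · -- the whole segment is digits: the loop runs off the end
        rw [pvA_loop_of_eq seg 0 h0 heq, pvB_idLoop_of_eq seg 0 (P + kwd.length) seg heq]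
        dsimp only
        rw [if_neg (by simp)]
        simp only [Option.some.injEq, Prod.mk.injEq]
        refine ⟨trivial, ?_⟩
        have : 1 ≤ seg.length := List.length_pos_iff.mpr h0
        omega

theorem pv_scan_eq (s : List Char) :
    (match pvA_extract_account_id s 0 "players/".toList with
     | some v => some v
     | none => pvA_extract_account_id s 0 "player/".toList)
    = (match pvB_next s "players/".toList with
       | some r => some r
       | none => pvB_next s "player/".toList) := by
  rw [pv_helper_eq s "players/".toList (by decide),
      pv_helper_eq s "player/".toList (by decide)]

theorem pvB_next_nil (kwd : List Char) (hk : kwd ≠ []) : pvB_next [] kwd = none := by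
  unfold pvB_next pvB_partition
  rw [if_pos (by rw [pv_find_nil kwd hk]; norm_num)]

theorem pv_go_eq : ∀ (n : Nat) (s : List Char) (res : List (List Char)),
    s.length ≤ n → pvB_go s res = res ++ pvA_ids s := by
  intro n
  induction n with
  | zero =>
    intro s res h
    have hs : s = [] := by cases s <;> simp_all
    subst hs
    rw [pvB_go, pvA_ids]
    rw [pvB_next_nil _ (by decide), pvB_next_nil _ (by decide),
        pvA_id_nil "players/".toList, pvA_id_nil "player/".toList]
    simp
  | succ n ih =>
    intro s res h
    rw [pvB_go, pvA_ids, ← pv_scan_eq s]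
    cases h1 : pvA_extract_account_id s 0 "players/".toList with
    | some v =>
      obtain ⟨acc, idx⟩ := v
      dsimp only
      have hb := pvA_id_bound s "players/".toList acc idx h1
      by_cases ha : acc = []
      · simp [ha]
      · rw [if_neg ha, if_neg ha]
        rw [ih _ (res ++ [acc])
            (by have := pv_slice_len_lt s idx hb.1 hb.2; omega)]
        simp
    | none =>
      dsimp only
      cases h2 : pvA_extract_account_id s 0 "player/".toList with
      | some v =>
        obtain ⟨acc, idx⟩ := v
        dsimp only
        have hb := pvA_id_bound s "player/".toList acc idx h2
        by_cases ha : acc = []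
        · simp [ha]
        · rw [if_neg ha, if_neg ha]
          rw [ih _ (res ++ [acc])
              (by have := pv_slice_len_lt s idx hb.1 hb.2; omega)]
          simp
      | none => dsimp only; simp

theorem pv_main (s : List Char) : pvA_ids s = pvB_go s [] := by
  rw [pv_go_eq s.length s [] le_rfl]; rfl

-- ===== VERDICT (by name: the statement is the Claim_ definition above) =====
theorem extract_account_ids2_spec : Claim_equal_extract_account_ids2 := by
  intro profile_url _
  unfold Spec_extract_account_ids2 extract_account_ids2 extract_account_ids2_alt
  rw [pv_main]
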